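-- pv_equiv track=rewrite | github.com/y0d8/menuscript | menuscript/utils.py | _hexmask_to_prefix
-- ===== SOURCE A (Python) =====
-- def _hexmask_to_prefix(hexmask):
--     try:
--         if hexmask.startswith('0x'):
--             val = int(hexmask, 16)
--             mask_bytes = [(val >> (i*8)) & 0xFF for i in (3,2,1,0)]
--             bits = ''.join(f'{b:08b}' for b in mask_bytes)
--             return bits.count('1')
--     except Exception:
--         pass
--     return None
-- ===== SOURCE B (Python) =====
-- def _hexmask_to_prefix(hexmask):
--     try:
--         if hexmask.startswith('0x'):
--             v = int(hexmask, 16) & 0xFFFFFFFF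
--             count = 0
--             while v:
--                 v &= v - 1
--                 count += 1
--             return count
--     except Exception:
--         pass
--     return None
-- ===== Notes on version B (the rewrite author's own statement) =====
-- stated objective: idiomatic
-- what changed: Replaced the byte-list / zero-padded binary-string / substring-count pipeline by Brian Kernighan's popcount loop on the value masked to its low 32 bits (val & 0xFFFFFFFF), clearing one set bit per iteration and keeping only a running count.
import Mathlib
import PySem

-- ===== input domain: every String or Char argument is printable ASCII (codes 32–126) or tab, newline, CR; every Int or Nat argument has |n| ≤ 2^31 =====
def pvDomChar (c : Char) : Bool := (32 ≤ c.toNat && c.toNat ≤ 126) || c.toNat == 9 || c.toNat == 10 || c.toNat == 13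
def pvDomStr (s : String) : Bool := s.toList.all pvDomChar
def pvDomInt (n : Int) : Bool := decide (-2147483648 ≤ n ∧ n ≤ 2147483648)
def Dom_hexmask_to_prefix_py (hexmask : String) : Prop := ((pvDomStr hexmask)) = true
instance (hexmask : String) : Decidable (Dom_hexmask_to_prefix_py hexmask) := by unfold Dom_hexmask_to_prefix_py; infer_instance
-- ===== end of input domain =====

-- B replaces A's byte-list / binary-string / substring-count pipeline by Kernighan's
-- popcount loop on the value masked to its low 32 bits (objective: more idiomatic).

-- ===== PORT A =====

-- f'{b:08b}': binary digits zero-padded to width 8; exact for 0 ≤ b (the only values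
-- `(val >> k) & 0xFF` ever produces here)
def format08b (b : Int) : List Char :=
  let s := PySem.Int.toBinChars b
  List.replicate (8 - s.length) '0' ++ s

def hexmask_to_prefix_py (hexmask : String) : Option Int :=
  if PySem.Str.startswith hexmask "0x" = true then
    match PySem.Int.ofStrBase? hexmask 16 with
    | none => none  -- int() raises ValueError, caught by `except` → return None
    | some val =>
      -- [(val >> (i*8)) & 0xFF for i in (3,2,1,0)]  (shift amounts are the literals 24,16,8,0)
        let mask_bytes : List Int := [3, 2, 1, 0].map (fun i : Nat => PySem.Int.band (val >>> (i * 8)) 0xFF)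
      -- bits = ''.join(f'{b:08b}' for b in mask_bytes); return bits.count('1')
      let bits : List Char := (mask_bytes.map format08b).flatten
      some ((PySem.Chars.count bits ['1'] : Nat) : Int)
  else none

-- ===== PORT B =====

-- `count = 0; while v: v &= v - 1; count += 1; return count`; v = val & 0xFFFFFFFF is
-- nonnegative throughout, so the loop state is tracked as the Nat it is
def kernLoop (v : Nat) (count : Int) : Int :=
  if v = 0 then count else kernLoop (v &&& (v - 1)) (count + 1)
termination_by v
decreasing_by
  have h1 : v &&& (v - 1) ≤ v - 1 := Nat.and_le_right
  omega

def hexmask_to_prefix_py_alt (hexmask : String) : Option Int :=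
  if PySem.Str.startswith hexmask "0x" = true then
    match PySem.Int.ofStrBase? hexmask 16 with
    | none => none
    | some val => some (kernLoop (PySem.Int.band val 0xFFFFFFFF).toNat 0)
  else none

-- ===== PRECONDITION & SPEC =====
def Spec_hexmask_to_prefix_py (hexmask : String) (out : Option Int) : Prop := out = hexmask_to_prefix_py_alt hexmask
instance (hexmask : String) (out : Option Int) : Decidable (Spec_hexmask_to_prefix_py hexmask out) := by unfold Spec_hexmask_to_prefix_py; infer_instance

-- ===== CLAIM (what is proved, stated in full; the proofs are below) =====
def Claim_equal_hexmask_to_prefix_py : Prop := ∀ (hexmask : String), Dom_hexmask_to_prefix_py hexmask → Spec_hexmask_to_prefix_py hexmask (hexmask_to_prefix_py hexmask)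

-- ===== LEMMAS AND PROOFS =====

-- popcount, the common yardstick both sides are reduced to (kernel-transparent)
def pc (n : Nat) : Nat := PySem.Int.bitCount (n : Int)

theorem pc_step (n : Nat) : pc n = n % 2 + pc (n / 2) := by
  cases n with
  | zero => simp [pc]
  | succ m =>
    unfold pc
    rw [PySem.Int.bitCount_natCast (m := m + 1) (by omega)]

theorem pc_bit (a b : Nat) (hb : b ≤ 1) : pc (2 * a + b) = b + pc a := by
  rw [pc_step (2 * a + b)]
  have h1 : (2 * a + b) % 2 = b := by omega
  have h2 : (2 * a + b) / 2 = a := by omega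
  rw [h1, h2]

theorem pc_split (k : Nat) : ∀ a c : Nat, a < 2 ^ k → pc (a + 2 ^ k * c) = pc a + pc c := by
  induction k with
  | zero =>
    intro a c ha
    interval_cases a
    simp [pc]
  | succ k ih =>
    intro a c ha
    have hpow : 2 ^ (k + 1) = 2 * 2 ^ k := by ring
    rw [hpow] at ha ⊢
    have hsz : a + 2 * 2 ^ k * c = 2 * (a / 2 + 2 ^ k * c) + a % 2 := by
      have hq : 2 * 2 ^ k * c = 2 * (2 ^ k * c) := by ring
      rw [hq]; omega
    rw [hsz, pc_bit _ _ (by omega), ih (a / 2) c (by omega)]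
    rw [pc_step a]
    omega

-- the two Kernighan clearing identities, by bit extensionality
theorem land_odd (a : Nat) : (2 * a + 1) &&& (2 * a) = 2 * a := by
  apply Nat.eq_of_testBit_eq
  intro i
  cases i with
  | zero => simp [Nat.testBit_zero]
  | succ j =>
    have h1 : (2 * a + 1) / 2 = a := by omega
    have h2 : (2 * a) / 2 = a := by omega
    rw [Nat.testBit_land]
    simp [Nat.testBit_succ, h1, h2]

theorem land_even (a : Nat) (ha : 0 < a) : (2 * a) &&& (2 * a - 1) = 2 * (a &&& (a - 1)) := by
  apply Nat.eq_of_testBit_eq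
  intro i
  cases i with
  | zero =>
    rw [Nat.testBit_land]
    simp [Nat.testBit_zero]
  | succ j =>
    have h1 : (2 * a) / 2 = a := by omega
    have h2 : (2 * a - 1) / 2 = a - 1 := by omega
    have h3 : (2 * (a &&& (a - 1))) / 2 = a &&& (a - 1) := by omega
    rw [Nat.testBit_land]
    simp [Nat.testBit_succ, h1, h2, h3]

theorem pc_kern (v : Nat) (hv : 0 < v) : pc v = pc (v &&& (v - 1)) + 1 := by
  induction v using Nat.strong_induction_on with
  | _ v ih =>
    rcases Nat.even_or_odd v with ⟨a, hae⟩ | ⟨a, hao⟩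
    · -- v = 2 * a, a > 0
      have ha : 0 < a := by omega
      have hv2 : v = 2 * a := by omega
      subst hv2
      rw [land_even a ha]
      by_cases haone : a &&& (a - 1) = 0
      · rw [haone]
        have : pc (2 * a) = pc a := by
          have := pc_bit a 0 (by omega)
          simpa using this
        rw [this, ih a (by omega) ha, haone]
      · have hpos : 0 < a &&& (a - 1) := Nat.pos_of_ne_zero haone
        have e1 : pc (2 * a) = pc a := by have := pc_bit a 0 (by omega); simpa using this
        have e2 : pc (2 * (a &&& (a - 1))) = pc (a &&& (a - 1)) := by
          have := pc_bit (a &&& (a - 1)) 0 (by omega); simpa using this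
        rw [e1, e2, ih a (by omega) ha]
    · -- v = 2 * a + 1
      have hv2 : v = 2 * a + 1 := by omega
      subst hv2
      have hsub : 2 * a + 1 - 1 = 2 * a := by omega
      rw [hsub, land_odd a]
      have e1 : pc (2 * a + 1) = 1 + pc a := pc_bit a 1 (by omega)
      have e2 : pc (2 * a) = pc a := by have := pc_bit a 0 (by omega); simpa using this
      omega

theorem kernLoop_eq (v : Nat) : ∀ c : Int, kernLoop v c = c + (pc v : Int) := by
  induction v using Nat.strong_induction_on with
  | _ v ih =>
    intro c
    by_cases hv : v = 0
    · subst hv; rw [kernLoop]; simp [pc]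
    · rw [kernLoop]
      simp only [hv, if_false]
      have hlt : v &&& (v - 1) < v := by
        have : v &&& (v - 1) ≤ v - 1 := Nat.and_le_right
        omega
      rw [ih _ hlt (c + 1), pc_kern v (by omega)]
      push_cast
      ring

-- `x & (2^k - 1)` is `x % 2^k` (Python % = Lean's Int emod here), for every Int x
theorem bandMask (x : Int) (k : Nat) :
    PySem.Int.band x (2 ^ k - 1) = x % (2 ^ k : Nat) := by
  have hM : ((2 : Int) ^ k - 1) = ((2 ^ k - 1 : Nat) : Int) := by
    have : (1 : Nat) ≤ 2 ^ k := Nat.one_le_two_pow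
    push_cast [this]
    ring
  by_cases hx : 0 ≤ x
  · rw [hM, PySem.Int.band_of_nonneg hx (by positivity)]
    rw [Int.toNat_natCast, Nat.and_two_pow_sub_one_eq_mod, Int.natCast_mod,
       Int.toNat_of_nonneg hx]
  · -- x < 0 : band x M = (M-1) - ((-x-1) &&& (M-1)), and that is x mod M
    rw [hM, PySem.Int.band.eq_1]
    rw [if_neg (by omega), if_pos (by positivity)]
    rw [Int.toNat_natCast, Nat.land_comm, Nat.and_two_pow_sub_one_eq_mod]
    set M : Nat := 2 ^ k with hMdef
    have hM1 : 1 ≤ M := Nat.one_le_two_pow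
    set m : Nat := (-x - 1).toNat with hmdef
    have hxm : x = -((m : Int) + 1) := by omega
    have hmod : m % M < M := Nat.mod_lt _ (by omega)
    have hmmZ : (M : Int) * ((m / M : Nat) : Int) + ((m % M : Nat) : Int) = (m : Int) := by
      exact_mod_cast Nat.div_add_mod m M
    have hdecomp : x = ((M : Int) - 1 - (m % M : Nat)) + (M : Int) * (-(((m / M : Nat) : Int)) - 1) := by
      rw [hxm]
      linarith [hmmZ]
    calc ((M - 1 - m % M : Nat) : Int)
        = ((M : Int) - 1 - ((m % M : Nat) : Int)) := by push_cast [Nat.mod_le m M]; omega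
      _ = (((M : Int) - 1 - (m % M : Nat)) + (M : Int) * (-(((m / M : Nat) : Int)) - 1)) % (M : Int) := by
          rw [Int.add_mul_emod_self_left, Int.emod_eq_of_lt (by push_cast; omega) (by push_cast; omega)]
      _ = x % (M : Nat) := by rw [← hdecomp]

-- counting the single character '1' is List.count
theorem count_go_single (l : List Char) : ∀ (fuel acc : Nat), l.length ≤ fuel →
    PySem.Chars.count.go ['1'] fuel l acc = acc + l.count '1' := by
  induction l with
  | nil => intro fuel acc _; cases fuel <;> simp [PySem.Chars.count.go]
  | cons h t ih =>
    intro fuel acc hf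
    cases fuel with
    | zero => simp at hf
    | succ f =>
      rw [PySem.Chars.count.go]
      simp only [List.length_cons] at hf
      by_cases hh : h = '1'
      · subst hh
        rw [if_pos (by simp [List.isPrefixOf])]
        have hd : List.drop (['1'] : List Char).length ('1' :: t) = t := by simp
        rw [hd, ih f (acc + 1) (by omega)]
        simp
        omega
      · rw [if_neg (by simp [List.isPrefixOf]; exact fun hc => hh hc.symm)]
        rw [ih f acc (by omega)]
        simp [List.count_cons]
        intro hc; exact hh hc

theorem count_single (l : List Char) : PySem.Chars.count l ['1'] = l.count '1' := by
  rw [PySem.Chars.count]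
  norm_num
  rw [count_go_single l l.length 0 (le_refl _)]
  omega

-- the zero-padded 8-bit binary rendering of a byte has pc n ones
set_option maxRecDepth 8192 in
theorem f08b_count_fin : ∀ n : Fin 256, (format08b ((n : Nat) : Int)).count '1' = pc n.val := by
  decide

theorem f08b_count (n : Nat) (h : n < 256) : (format08b ((n : Nat) : Int)).count '1' = pc n :=
  f08b_count_fin ⟨n, h⟩

-- the computational core: A's 4-byte binary-string count equals B's Kernighan loop
theorem core_eq (val : Int) :
    ((PySem.Chars.count ((([3, 2, 1, 0].map
        (fun i : Nat => PySem.Int.band (val >>> (i * 8)) 0xFF)).map format08b).flatten) ['1'] : Nat) : Int)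
      = kernLoop (PySem.Int.band val 0xFFFFFFFF).toNat 0 := by
  have hb32 : PySem.Int.band val 0xFFFFFFFF = val % 4294967296 := by
    have h := bandMask val 32
    norm_num at h
    exact h
  set m : Nat := (val % 4294967296).toNat with hmdef
  have hmv : (m : Int) = val % 4294967296 := by omega
  -- the four bytes
  have hb3 : PySem.Int.band (val >>> (24 : Nat)) 0xFF = ((m / 16777216 % 256 : Nat) : Int) := by
    have h := bandMask (val >>> (24 : Nat)) 8
    norm_num at h
    rw [h, Int.shiftRight_eq_div_pow]
    norm_num
    omega
  have hb2 : PySem.Int.band (val >>> (16 : Nat)) 0xFF = ((m / 65536 % 256 : Nat) : Int) := by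
    have h := bandMask (val >>> (16 : Nat)) 8
    norm_num at h
    rw [h, Int.shiftRight_eq_div_pow]
    norm_num
    omega
  have hb1 : PySem.Int.band (val >>> (8 : Nat)) 0xFF = ((m / 256 % 256 : Nat) : Int) := by
    have h := bandMask (val >>> (8 : Nat)) 8
    norm_num at h
    rw [h, Int.shiftRight_eq_div_pow]
    norm_num
    omega
  have hb0 : PySem.Int.band val 0xFF = ((m % 256 : Nat) : Int) := by
    have h := bandMask val 8
    norm_num at h
    rw [h]
    omega
  -- A's side: sum of per-byte popcounts
  simp only [List.map_cons, List.map_nil, List.flatten]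
  norm_num
  rw [hb3, hb2, hb1, hb0]
  rw [count_single]
  simp only [List.count_append]
  rw [f08b_count _ (by omega), f08b_count _ (by omega), f08b_count _ (by omega),
      f08b_count _ (by omega)]
  -- B's side
  rw [hb32, ← hmv, Int.toNat_natCast, kernLoop_eq m 0]
  -- popcount splits over the four bytes
  have hmlt : m < 4294967296 := by omega
  have s3 : pc m = pc (m % 16777216) + pc (m / 16777216) := by
    have h := pc_split 24 (m % 16777216) (m / 16777216) (by norm_num; omega)
    norm_num at h
    rw [← h]
    congr 1
    omega
  have s2 : pc (m % 16777216) = pc (m % 65536) + pc (m / 65536 % 256) := by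
    have h := pc_split 16 (m % 65536) (m / 65536 % 256) (by norm_num; omega)
    norm_num at h
    rw [← h]
    congr 1
    omega
  have s1 : pc (m % 65536) = pc (m % 256) + pc (m / 256 % 256) := by
    have h := pc_split 8 (m % 256) (m / 256 % 256) (by norm_num; omega)
    norm_num at h
    rw [← h]
    congr 1
    omega
  have s0 : pc (m / 16777216) = pc (m / 16777216 % 256) := by
    congr 1
    omega
  rw [s3, s2, s1, s0]
  push_cast
  ring

-- ===== VERDICT (by name: the statement is the Claim_ definition above) =====
theorem hexmask_to_prefix_py_spec : Claim_equal_hexmask_to_prefix_py := by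
  intro hexmask _
  unfold Spec_hexmask_to_prefix_py hexmask_to_prefix_py hexmask_to_prefix_py_alt
  cases hs : PySem.Str.startswith hexmask "0x" with
  | false => simp
  | true =>
    simp only [if_true]
    cases hp : PySem.Int.ofStrBase? hexmask 16 with
    | none => rfl
    | some val =>
      simp only []
      exact congrArg some (core_eq val)
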